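-- pv_equiv track=rewrite | github.com/HaShira-Lab/torah-phonetic-architecture | src/analyses/layer_c/layer_c_phrase_final.py | phrase_final_tails
-- ===== SOURCE A (Python) =====
-- VOWELS = {"a", "e", "i", "o", "u"}
--
-- DIGRAPHS = ("sh", "kh", "ts")
--
-- def tokenize(word: str):
--     out = []
--     i = 0
--     while i < len(word):
--         two = word[i:i + 2]
--         if two in DIGRAPHS:
--             out.append(two)
--             i += 2
--         else:
--             out.append(word[i])
--             i += 1
--     return out
--
-- def normalize_tokens(tokens, eq_kh_k: int, eq_ts_s: int):
--     out = []
--     for t in tokens: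
--         if t == "d":
--             t = "t"
--         elif eq_kh_k and t == "kh":
--             t = "k"
--         elif eq_ts_s and t == "ts":
--             t = "s"
--         out.append(t)
--     return out
--
-- def get_tail(word: str, eq_kh_k: int, eq_ts_s: int):
--     toks = tokenize(word)
--     toks = normalize_tokens(toks, eq_kh_k, eq_ts_s)
--
--     last_v = -1
--     for i, t in enumerate(toks):
--         if t in VOWELS:
--             last_v = i
--
--     if last_v == -1:
--         return None
--
--     tail = toks[last_v:]
--     if len(tail) < 2:
--         return None
--
--     return tuple(tail)
--
-- def phrase_final_tails(phrases, eq_kh_k: int, eq_ts_s: int):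
--     tails = []
--     finals = []
--     for p in phrases:
--         final_word = p[-1] if p else None
--         finals.append(final_word)
--         tails.append(get_tail(final_word, eq_kh_k, eq_ts_s) if final_word else None)
--     return finals, tails
-- ===== SOURCE B (Python) =====
-- VOWELS = {"a", "e", "i", "o", "u"}
--
--
-- def _tail(word, eq_kh_k, eq_ts_s):
--     # one pass: emit each normalized token and maintain the current candidate
--     # tail directly (restart it at every vowel); no token list, no index scan,
--     # no slice.
--     tail = None
--     i = 0
--     n = len(word)
--     while i < n:
--         two = word[i:i + 2]
--         if two == "sh":
--             t = "sh"
--             i += 2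
--         elif two == "kh":
--             t = "k" if eq_kh_k else "kh"
--             i += 2
--         elif two == "ts":
--             t = "s" if eq_ts_s else "ts"
--             i += 2
--         else:
--             c = word[i]
--             t = "t" if c == "d" else c
--             i += 1
--         if t in VOWELS:
--             tail = [t]
--         elif tail is not None:
--             tail.append(t)
--     if tail is None or len(tail) < 2:
--         return None
--     return tuple(tail)
--
--
-- def phrase_final_tails(phrases, eq_kh_k, eq_ts_s):
--     finals = [p[-1] if p else None for p in phrases]
--     tails = [_tail(w, eq_kh_k, eq_ts_s) if w else None for w in finals]
--     return finals, tails
-- ===== Notes on version B (the rewrite author's own statement) =====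
-- stated objective: simpler
-- what changed: get_tail's three passes (tokenize into a list, normalize into a second list, enumerate-scan for the last vowel, then slice) are fused into one single pass over the word that emits each token already normalized and maintains the current candidate tail directly, restarting it at each vowel, so the token list, the index scan and the slice disappear.
import Mathlib
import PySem

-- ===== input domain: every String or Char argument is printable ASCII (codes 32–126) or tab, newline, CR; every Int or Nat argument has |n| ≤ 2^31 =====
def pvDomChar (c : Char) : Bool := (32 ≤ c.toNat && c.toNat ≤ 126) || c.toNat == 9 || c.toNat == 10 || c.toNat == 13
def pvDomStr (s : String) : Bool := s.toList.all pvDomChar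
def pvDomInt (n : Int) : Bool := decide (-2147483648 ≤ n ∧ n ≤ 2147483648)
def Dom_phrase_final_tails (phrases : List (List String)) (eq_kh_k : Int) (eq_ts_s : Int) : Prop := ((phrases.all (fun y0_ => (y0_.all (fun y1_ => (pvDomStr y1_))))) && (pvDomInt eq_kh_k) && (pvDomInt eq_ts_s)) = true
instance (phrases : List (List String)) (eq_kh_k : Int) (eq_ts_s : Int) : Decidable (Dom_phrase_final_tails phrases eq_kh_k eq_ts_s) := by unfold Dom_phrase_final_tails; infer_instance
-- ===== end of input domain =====

-- B rewrites get_tail as one fused pass (normalize while tokenizing, maintain the current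
-- candidate tail directly, restarting it at each vowel), removing the token list, the
-- enumerate scan and the slice; objective: simpler. Same return value as A everywhere.

-- ===== PORT A =====
def pvVOWELS : List String := ["a", "e", "i", "o", "u"]
def pvDIGRAPHS : List String := ["sh", "kh", "ts"]

-- while i < len(word): two = word[i:i+2]; digraph → emit two, i += 2; else emit word[i], i += 1
def pvTokenize : List Char → List String
  | [] => []
  | [c] =>
      let two := String.ofList [c]
      if two ∈ pvDIGRAPHS then [two] else [String.ofList [c]]
  | c1 :: c2 :: rest =>
      let two := String.ofList [c1, c2]
      if two ∈ pvDIGRAPHS then two :: pvTokenize rest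
      else String.ofList [c1] :: pvTokenize (c2 :: rest)

def pvNorm (eq_kh_k eq_ts_s : Int) (t : String) : String :=
  if t = "d" then "t"
  else if eq_kh_k ≠ 0 ∧ t = "kh" then "k"
  else if eq_ts_s ≠ 0 ∧ t = "ts" then "s"
  else t

def pvNormalizeTokens (tokens : List String) (eq_kh_k eq_ts_s : Int) : List String :=
  tokens.foldl (fun out t => out ++ [pvNorm eq_kh_k eq_ts_s t]) []

def pvGetTail (word : String) (eq_kh_k eq_ts_s : Int) : Option (List String) :=
  let toks := pvNormalizeTokens (pvTokenize word.toList) eq_kh_k eq_ts_s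
  let last_v : Int := (PySem.List.enumerate toks).foldl
      (fun lv p => if p.2 ∈ pvVOWELS then p.1 else lv) (-1)
  if last_v = -1 then none
  else
    let tail := PySem.List.slice toks (some last_v) none
    if tail.length < 2 then none else some tail

def phrase_final_tails (phrases : List (List String)) (eq_kh_k : Int) (eq_ts_s : Int) :
    List (Option String) × List (Option (List String)) :=
  phrases.foldl
    (fun (acc : List (Option String) × List (Option (List String))) p =>
      let final_word : Option String := if p = [] then none else PySem.List.pyGet? p (-1)
      (acc.1 ++ [final_word],
       acc.2 ++ [match final_word with
                 | some w => if w ≠ "" then pvGetTail w eq_kh_k eq_ts_s else none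
                 | none => none]))
    ([], [])

-- ===== PORT B =====
def pvVowelsB : List String := ["a", "e", "i", "o", "u"]

-- if t in VOWELS: tail = [t]  elif tail is not None: tail.append(t)
def pvUpd (tail : Option (List String)) (t : String) : Option (List String) :=
  if t ∈ pvVowelsB then some [t]
  else match tail with
       | some l => some (l ++ [t])
       | none => none

-- the single while loop of Source B's _tail
def pvTailLoop (eq_kh_k eq_ts_s : Int) : List Char → Option (List String) → Option (List String)
  | [], tail => tail
  | [c], tail =>
      pvUpd tail (if c = 'd' then "t" else String.ofList [c])
  | c1 :: c2 :: rest, tail =>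
      let two := String.ofList [c1, c2]
      if two = "sh" then pvTailLoop eq_kh_k eq_ts_s rest (pvUpd tail "sh")
      else if two = "kh" then
        pvTailLoop eq_kh_k eq_ts_s rest (pvUpd tail (if eq_kh_k ≠ 0 then "k" else "kh"))
      else if two = "ts" then
        pvTailLoop eq_kh_k eq_ts_s rest (pvUpd tail (if eq_ts_s ≠ 0 then "s" else "ts"))
      else pvTailLoop eq_kh_k eq_ts_s (c2 :: rest)
        (pvUpd tail (if c1 = 'd' then "t" else String.ofList [c1]))

def pvTailB (word : String) (eq_kh_k eq_ts_s : Int) : Option (List String) :=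
  match pvTailLoop eq_kh_k eq_ts_s word.toList none with
  | none => none
  | some l => if l.length < 2 then none else some l

def phrase_final_tails_alt (phrases : List (List String)) (eq_kh_k : Int) (eq_ts_s : Int) :
    List (Option String) × List (Option (List String)) :=
  let finals := phrases.map (fun p => if p = [] then none else PySem.List.pyGet? p (-1))
  let tails := finals.map (fun w => match w with
      | some w => if w ≠ "" then pvTailB w eq_kh_k eq_ts_s else none
      | none => none)
  (finals, tails)

-- ===== PRECONDITION & SPEC =====
def Spec_phrase_final_tails (phrases : List (List String)) (eq_kh_k : Int) (eq_ts_s : Int) (out : List (Option String) × List (Option (List String))) : Prop := out = phrase_final_tails_alt phrases eq_kh_k eq_ts_s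
instance (phrases : List (List String)) (eq_kh_k : Int) (eq_ts_s : Int) (out : List (Option String) × List (Option (List String))) : Decidable (Spec_phrase_final_tails phrases eq_kh_k eq_ts_s out) := by unfold Spec_phrase_final_tails; infer_instance

-- ===== CLAIM (what is proved, stated in full; the proofs are below) =====
def Claim_equal_phrase_final_tails : Prop := ∀ (phrases : List (List String)) (eq_kh_k : Int) (eq_ts_s : Int), Dom_phrase_final_tails phrases eq_kh_k eq_ts_s → Spec_phrase_final_tails phrases eq_kh_k eq_ts_s (phrase_final_tails phrases eq_kh_k eq_ts_s)

-- ===== LEMMAS AND PROOFS =====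

theorem pvSingle_ne_sh (c : Char) : String.ofList [c] ≠ "sh" := by
  intro h; have := congrArg String.toList h; simp at this

theorem pvSingle_ne_kh (c : Char) : String.ofList [c] ≠ "kh" := by
  intro h; have := congrArg String.toList h; simp at this

theorem pvSingle_ne_ts (c : Char) : String.ofList [c] ≠ "ts" := by
  intro h; have := congrArg String.toList h; simp at this

theorem pvSingle_eq_d (c : Char) : String.ofList [c] = "d" ↔ c = 'd' := by
  constructor
  · intro h; have := congrArg String.toList h; simpa using this
  · intro h; rw [h]

theorem pvNorm_single (k s : Int) (c : Char) :
    pvNorm k s (String.ofList [c]) = (if c = 'd' then "t" else String.ofList [c]) := by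
  by_cases hc : c = 'd'
  · subst hc; simp [pvNorm]
  · have h1 : ¬ (String.ofList [c] = "d") := by
      rw [pvSingle_eq_d]; exact hc
    simp [pvNorm, h1, pvSingle_ne_kh, pvSingle_ne_ts, hc]

theorem pvNorm_sh (k s : Int) : pvNorm k s "sh" = "sh" := by simp [pvNorm]

theorem pvNorm_kh (k s : Int) : pvNorm k s "kh" = if k ≠ 0 then "k" else "kh" := by
  by_cases hk : k = 0 <;> simp [pvNorm, hk]

theorem pvNorm_ts (k s : Int) : pvNorm k s "ts" = if s ≠ 0 then "s" else "ts" := by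
  by_cases hs : s = 0 <;> simp [pvNorm, hs]

-- L1: the fused loop of B equals "fold pvUpd over A's normalized token stream"
theorem pvTailLoop_eq (k s : Int) (cs : List Char) : ∀ tail,
    pvTailLoop k s cs tail =
      (pvTokenize cs).foldl (fun t tok => pvUpd t (pvNorm k s tok)) tail := by
  induction cs using pvTokenize.induct with
  | case1 => intro tail; simp [pvTailLoop, pvTokenize]
  | case2 c two h =>
      exact absurd h (by
        simp only [pvDIGRAPHS, List.mem_cons, List.not_mem_nil, or_false, not_or]
        exact ⟨pvSingle_ne_sh c, pvSingle_ne_kh c, pvSingle_ne_ts c⟩)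
  | case3 c two h =>
      intro tail
      simp [pvTailLoop, pvTokenize, h, pvNorm_single]
  | case4 c1 c2 rest two h ih =>
      intro tail
      have htwo : two = String.ofList [c1, c2] := rfl
      rw [htwo] at h
      simp only [pvDIGRAPHS, List.mem_cons, List.not_mem_nil, or_false] at h
      rcases h with h | h | h <;>
        simp [pvTailLoop, pvTokenize, pvDIGRAPHS, h, pvNorm_sh, pvNorm_kh, pvNorm_ts, ih]
  | case5 c1 c2 rest two h ih =>
      intro tail
      have htwo : two = String.ofList [c1, c2] := rfl
      rw [htwo] at h
      simp only [pvDIGRAPHS, List.mem_cons, List.not_mem_nil, or_false, not_or] at h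
      obtain ⟨h1, h2, h3⟩ := h
      have hmem : String.ofList [c1, c2] ∉ pvDIGRAPHS := by
        simp [pvDIGRAPHS, h1, h2, h3]
      simp [pvTailLoop, pvTokenize, h1, h2, h3, hmem, pvNorm_single, ih]

-- L2: joint characterization of A's last-vowel scan and B's fold over the same tokens
theorem pvFold_char (toks : List String) :
    ((PySem.List.enumerate toks).foldl (fun lv p => if p.2 ∈ pvVOWELS then p.1 else lv) (-1) = -1
       ∧ toks.foldl pvUpd none = none)
  ∨ (∃ j : Nat, j < toks.length
       ∧ (PySem.List.enumerate toks).foldl (fun lv p => if p.2 ∈ pvVOWELS then p.1 else lv) (-1) = (j : Int)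
       ∧ toks.foldl pvUpd none = some (toks.drop j)) := by
  induction toks using List.reverseRecOn with
  | nil => left; constructor <;> rfl
  | append_singleton xs x ih =>
      have henum : PySem.List.enumerate (xs ++ [x]) =
          PySem.List.enumerate xs ++ [((xs.length : Int), x)] := by
        rw [PySem.List.enumerate_append]
        simp [PySem.List.enumerate_cons, PySem.List.enumerate_nil]
      by_cases hx : x ∈ pvVOWELS
      · right
        have hxB : x ∈ pvVowelsB := hx
        refine ⟨xs.length, by simp, ?_, ?_⟩
        · rw [henum, List.foldl_append]; simp [hx]
        · rw [List.foldl_append]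
          simp [pvUpd, hxB, List.drop_left]
      · have hxB : x ∉ pvVowelsB := hx
        rcases ih with ⟨h1, h2⟩ | ⟨j, hj, h1, h2⟩
        · left
          constructor
          · rw [henum, List.foldl_append]; simp [hx, h1]
          · rw [List.foldl_append]; simp [h2, pvUpd, hxB]
        · right
          refine ⟨j, by simp; omega, ?_, ?_⟩
          · rw [henum, List.foldl_append]; simp [hx, h1]
          · rw [List.foldl_append]
            simp only [List.foldl_cons, List.foldl_nil, h2]
            rw [List.drop_append_of_le_length (by omega)]
            simp [pvUpd, hxB]

-- A's token list is the map of pvNorm over tokenize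
theorem pvNormalizeTokens_eq_map (toks : List String) (k s : Int) :
    pvNormalizeTokens toks k s = toks.map (pvNorm k s) := by
  unfold pvNormalizeTokens
  simpa using PySem.List.foldl_append_singleton_eq_map (pvNorm k s) toks []

-- core: get_tail = B's fused tail on every word
theorem pvGetTail_eq (w : String) (k s : Int) : pvGetTail w k s = pvTailB w k s := by
  unfold pvGetTail pvTailB
  have hloop : pvTailLoop k s w.toList none =
      (pvNormalizeTokens (pvTokenize w.toList) k s).foldl pvUpd none := by
    rw [pvTailLoop_eq, pvNormalizeTokens_eq_map, List.foldl_map]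
  rcases pvFold_char (pvNormalizeTokens (pvTokenize w.toList) k s) with ⟨h1, h2⟩ | ⟨j, hj, h1, h2⟩
  · rw [hloop] at *
    simp [h1, h2]
  · rw [hloop] at *
    have hne : ((j : Int)) ≠ -1 := by omega
    simp only [h1, h2, hne, if_false]
    rw [PySem.List.slice_from_natCast]

theorem pvFoldPair (k s : Int) (ps : List (List String)) : ∀ accF accT,
    ps.foldl
      (fun (acc : List (Option String) × List (Option (List String))) p =>
        let final_word : Option String := if p = [] then none else PySem.List.pyGet? p (-1)
        (acc.1 ++ [final_word],
         acc.2 ++ [match final_word with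
                   | some w => if w ≠ "" then pvGetTail w k s else none
                   | none => none]))
      (accF, accT)
    = (accF ++ ps.map (fun p => if p = [] then none else PySem.List.pyGet? p (-1)),
       accT ++ ps.map (fun p =>
         match (if p = [] then none else PySem.List.pyGet? p (-1)) with
         | some w => if w ≠ "" then pvGetTail w k s else none
         | none => none)) := by
  induction ps with
  | nil => intro accF accT; simp
  | cons p ps ih =>
      intro accF accT
      rw [List.foldl_cons, ih]
      simp

-- ===== VERDICT (by name: the statement is the Claim_ definition above) =====
theorem phrase_final_tails_spec : Claim_equal_phrase_final_tails := by
  intro phrases k s _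
  unfold Spec_phrase_final_tails phrase_final_tails phrase_final_tails_alt
  rw [pvFoldPair]
  simp only [List.nil_append, List.map_map]
  refine Prod.ext rfl ?_
  simp only [Function.comp]
  apply List.map_congr_left
  intro p _
  by_cases hp : p = [] <;> simp [hp, pvGetTail_eq]
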